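-- pv_equiv track=rewrite | github.com/iseekk/Learning_Python | Codewars/intro_to_art.py | get_w1
-- ===== SOURCE A (Python) =====
-- def get_w1(height):
--     if height < 2: return []
--     outcome = [""] * height
--     for i in range(len(outcome)):
--         outcome[i] += "*" if not i else " "
--     last = 0
--     for i in range(2):
--         for j in range(height - 1):
--             inserted = False
--             for index, verse in enumerate(outcome):
--                 if index - 1 == last and not inserted:
--                     outcome[index] += "*"
--                     last += 1
--                     inserted = True
--                 else:
--                     outcome[index] += " "
--         for k in range(height - 1):
--             inserted = False
--             for index, verse in enumerate(outcome):
--                 if index + 1 == last and not inserted: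
--                     outcome[index] += "*"
--                     last -= 1
--                     inserted = True
--                 else:
--                     outcome[index] += " "
--     return outcome
-- ===== SOURCE B (Python) =====
-- def get_w1(height):
--     if height < 2:
--         return []
--     sweep = list(range(1, height)) + list(range(height - 2, -1, -1))
--     positions = [0] + sweep + sweep
--     return ["".join("*" if p == r else " " for p in positions)
--             for r in range(height)]
-- ===== Notes on version B (the rewrite author's own statement) =====
-- stated objective: simpler
-- what changed: Replaces the mutable 'last' cursor with per-column full-row rescans and an 'inserted' flag by an up-front list of star row-indices per column (one down-sweep plus one up-sweep, repeated twice) and a single rendering pass joining '*'/' ' per row.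
import Mathlib
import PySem

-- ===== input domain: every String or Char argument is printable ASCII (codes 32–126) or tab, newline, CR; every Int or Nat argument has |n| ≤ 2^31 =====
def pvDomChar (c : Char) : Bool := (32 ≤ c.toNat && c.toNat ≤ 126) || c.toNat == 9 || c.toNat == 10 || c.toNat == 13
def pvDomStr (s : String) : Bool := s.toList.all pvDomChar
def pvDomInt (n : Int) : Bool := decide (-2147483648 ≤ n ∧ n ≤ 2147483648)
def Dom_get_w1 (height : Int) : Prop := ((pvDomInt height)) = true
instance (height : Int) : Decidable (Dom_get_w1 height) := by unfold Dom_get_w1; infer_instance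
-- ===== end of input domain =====

-- ===== PORT A =====
-- A zigzag star picture. Header: B precomputes the star row-index of every
-- column and renders each row in one pass, instead of A's shared 'last'
-- cursor with a per-column rescan of all rows; objective: simpler.

-- inner loop "for i in range(len(outcome)): outcome[i] += '*' if not i else ' '"
def initRows : List String → Nat → List String
  | [], _ => []
  | s :: rest, i => (s ++ (if i = 0 then "*" else " ")) :: initRows rest (i + 1)

-- inner loop of a down column: enumerate(outcome) with the 'inserted' flag and 'last'
def downRows : List String → Nat → Int → Bool → List String × Int
  | [], _, last, _ => ([], last)
  | s :: rest, i, last, ins =>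
    if (i : Int) - 1 = last ∧ ins = false then
      let r := downRows rest (i + 1) (last + 1) true
      ((s ++ "*") :: r.1, r.2)
    else
      let r := downRows rest (i + 1) last ins
      ((s ++ " ") :: r.1, r.2)

-- inner loop of an up column
def upRows : List String → Nat → Int → Bool → List String × Int
  | [], _, last, _ => ([], last)
  | s :: rest, i, last, ins =>
    if (i : Int) + 1 = last ∧ ins = false then
      let r := upRows rest (i + 1) (last - 1) true
      ((s ++ "*") :: r.1, r.2)
    else
      let r := upRows rest (i + 1) last ins
      ((s ++ " ") :: r.1, r.2)

-- "for j in range(height - 1):" down sweep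
def downLoop : Nat → List String × Int → List String × Int
  | 0, st => st
  | n + 1, st => downLoop n (downRows st.1 0 st.2 false)

-- "for k in range(height - 1):" up sweep
def upLoop : Nat → List String × Int → List String × Int
  | 0, st => st
  | n + 1, st => upLoop n (upRows st.1 0 st.2 false)

def get_w1 (height : Int) : List String :=
  if height < 2 then []
  else
    let h := height.toNat
    let outcome := initRows (List.replicate h "") 0
    let m := (height - 1).toNat
    let st := (List.range 2).foldl
      (fun st _ => upLoop m (downLoop m st)) (outcome, (0 : Int))
    st.1

-- ===== PORT B =====
def get_w1_alt (height : Int) : List String :=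
  if height < 2 then []
  else
    let h := height.toNat
    let sweep := List.range' 1 (h - 1) ++ (List.range' 0 (h - 1)).reverse
    let positions := [0] ++ sweep ++ sweep
    (List.range h).map
      (fun r => String.ofList (positions.map (fun p => if p = r then '*' else ' ')))

-- ===== PRECONDITION & SPEC =====
def Spec_get_w1 (height : Int) (out : List String) : Prop := out = get_w1_alt height
instance (height : Int) (out : List String) : Decidable (Spec_get_w1 height out) := by unfold Spec_get_w1; infer_instance

-- ===== CLAIM (what is proved, stated in full; the proofs are below) =====
def Claim_equal_get_w1 : Prop := ∀ (height : Int), Dom_get_w1 height → Spec_get_w1 height (get_w1 height)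

-- ===== LEMMAS AND PROOFS =====

-- the row string a position list renders at row r ("*" where a column's star index equals r)
def renderRow (ps : List Nat) (r : Nat) : String :=
  String.ofList (ps.map (fun p => if p = r then '*' else ' '))

def render (h : Nat) (ps : List Nat) : List String :=
  (List.range h).map (renderRow ps)

theorem renderRow_append (ps : List Nat) (s r : Nat) :
    renderRow (ps ++ [s]) r = renderRow ps r ++ (if s = r then "*" else " ") := by
  simp only [renderRow, List.map_append, List.map_cons, List.map_nil, String.ofList_append]
  split <;> rfl

theorem downRows_true (f : Nat → String) :
    ∀ (n i : Nat) (last : Int),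
      downRows ((List.range' i n).map f) i last true
        = ((List.range' i n).map (fun r => f r ++ " "), last)
  | 0, _, _ => by simp [downRows]
  | n + 1, i, last => by
    rw [List.range'_succ]
    simp [downRows, downRows_true f n (i + 1) last]

theorem upRows_true (f : Nat → String) :
    ∀ (n i : Nat) (last : Int),
      upRows ((List.range' i n).map f) i last true
        = ((List.range' i n).map (fun r => f r ++ " "), last)
  | 0, _, _ => by simp [upRows]
  | n + 1, i, last => by
    rw [List.range'_succ]
    simp [upRows, upRows_true f n (i + 1) last]

theorem downRows_hit (f : Nat → String) :
    ∀ (n i : Nat) (last : Int), (i : Int) ≤ last + 1 → last + 1 < (i : Int) + n →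
      downRows ((List.range' i n).map f) i last false
        = ((List.range' i n).map
            (fun r => f r ++ (if (r : Int) = last + 1 then "*" else " ")), last + 1)
  | 0, i, last, h1, h2 => by omega
  | n + 1, i, last, h1, h2 => by
    rw [List.range'_succ]
    by_cases hc : (i : Int) - 1 = last
    · have hi : (i : Int) = last + 1 := by omega
      have htail : List.map (fun r => f r ++ if (r : Int) = last + 1 then "*" else " ")
            (List.range' (i + 1) n)
          = List.map (fun r => f r ++ " ") (List.range' (i + 1) n) := by
        apply List.map_congr_left
        intro r hr
        rw [List.mem_range'_1] at hr
        rw [if_neg (by omega)]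
      simp only [List.map_cons, downRows]
      rw [if_pos ⟨hc, trivial⟩, downRows_true f n (i + 1) (last + 1), htail, if_pos hi]
    · simp only [List.map_cons, downRows]
      rw [if_neg (fun h => hc h.1)]
      rw [downRows_hit f n (i + 1) last (by push_cast; omega) (by push_cast at h2 ⊢; omega)]
      rw [if_neg (by omega : ¬((i : Int) = last + 1))]

theorem upRows_hit (f : Nat → String) :
    ∀ (n i : Nat) (last : Int), (i : Int) ≤ last - 1 → last - 1 < (i : Int) + n →
      upRows ((List.range' i n).map f) i last false
        = ((List.range' i n).map
            (fun r => f r ++ (if (r : Int) = last - 1 then "*" else " ")), last - 1)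
  | 0, i, last, h1, h2 => by omega
  | n + 1, i, last, h1, h2 => by
    rw [List.range'_succ]
    by_cases hc : (i : Int) + 1 = last
    · have hi : (i : Int) = last - 1 := by omega
      have htail : List.map (fun r => f r ++ if (r : Int) = last - 1 then "*" else " ")
            (List.range' (i + 1) n)
          = List.map (fun r => f r ++ " ") (List.range' (i + 1) n) := by
        apply List.map_congr_left
        intro r hr
        rw [List.mem_range'_1] at hr
        rw [if_neg (by omega)]
      simp only [List.map_cons, upRows]
      rw [if_pos ⟨hc, trivial⟩, upRows_true f n (i + 1) (last - 1), htail, if_pos hi]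
    · simp only [List.map_cons, upRows]
      rw [if_neg (fun h => hc h.1)]
      rw [upRows_hit f n (i + 1) last (by push_cast; omega) (by push_cast at h2 ⊢; omega)]
      rw [if_neg (by omega : ¬((i : Int) = last - 1))]

theorem render_step (h : Nat) (ps : List Nat) (t : Nat) (c : Int) (hc : c = (t : Int)) :
    ((List.range' 0 h).map
      (fun r => renderRow ps r ++ (if (r : Int) = c then "*" else " ")))
      = render h (ps ++ [t]) := by
  rw [render, List.range_eq_range']
  apply List.map_congr_left
  intro r _
  rw [renderRow_append]
  congr 1
  rw [if_congr (by omega : ((r : Int) = c) ↔ (t = r)) rfl rfl]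

theorem downLoop_spec (h : Nat) :
    ∀ (n k : Nat) (ps : List Nat), k + n < h →
      downLoop n (render h ps, (k : Int))
        = (render h (ps ++ List.range' (k + 1) n), ((k + n : Nat) : Int))
  | 0, k, ps, _ => by simp [downLoop]
  | n + 1, k, ps, hkn => by
    rw [downLoop]
    dsimp only
    have hr : render h ps = (List.range' 0 h).map (renderRow ps) := by
      rw [render, List.range_eq_range']
    rw [hr]
    rw [downRows_hit (renderRow ps) h 0 (k : Int) (by push_cast; omega) (by push_cast; omega)]
    rw [render_step h ps (k + 1) ((k : Int) + 1) (by push_cast; ring)]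
    have : ((k : Int) + 1) = ((k + 1 : Nat) : Int) := by push_cast; ring
    rw [this, downLoop_spec h n (k + 1) (ps ++ [k + 1]) (by omega)]
    rw [List.append_assoc]
    have hrng : [k + 1] ++ List.range' (k + 1 + 1) n = List.range' (k + 1) (n + 1) := by
      rw [List.range'_succ]; rfl
    rw [hrng]
    congr 2
    omega

theorem upLoop_spec (h : Nat) :
    ∀ (n k : Nat) (ps : List Nat), n ≤ k → k < h →
      upLoop n (render h ps, (k : Int))
        = (render h (ps ++ (List.range' (k - n) n).reverse), ((k - n : Nat) : Int))
  | 0, k, ps, _, _ => by simp [upLoop]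
  | n + 1, k, ps, hnk, hkh => by
    rw [upLoop]
    dsimp only
    have hr : render h ps = (List.range' 0 h).map (renderRow ps) := by
      rw [render, List.range_eq_range']
    rw [hr]
    rw [upRows_hit (renderRow ps) h 0 (k : Int) (by push_cast; omega) (by push_cast; omega)]
    rw [render_step h ps (k - 1) ((k : Int) - 1) (by omega)]
    have : ((k : Int) - 1) = ((k - 1 : Nat) : Int) := by omega
    rw [this, upLoop_spec h n (k - 1) (ps ++ [k - 1]) (by omega) (by omega)]
    rw [List.append_assoc]
    have hrng : [k - 1] ++ (List.range' (k - 1 - n) n).reverse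
        = (List.range' (k - (n + 1)) (n + 1)).reverse := by
      have hk : k - (n + 1) = k - 1 - n := by omega
      rw [hk, List.range'_concat, List.reverse_append]
      simp only [List.reverse_singleton, List.singleton_append, one_mul]
      congr 2
      omega
    rw [hrng]
    congr 2
    omega

theorem initRows_spec (f : Nat → String) :
    ∀ (n i : Nat),
      initRows ((List.range' i n).map f) i
        = (List.range' i n).map (fun r => f r ++ (if r = 0 then "*" else " "))
  | 0, _ => by simp [initRows]
  | n + 1, i => by
    rw [List.range'_succ]
    simp [initRows, initRows_spec f n (i + 1)]

theorem init_render (h : Nat) : initRows (List.replicate h "") 0 = render h [0] := by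
  have h1 : List.replicate h "" = (List.range' 0 h).map (fun _ => "") := by
    rw [show (fun _ : Nat => ("" : String)) = Function.const Nat ("" : String) from rfl,
      List.map_const, List.length_range']
  rw [h1, initRows_spec]
  rw [render, List.range_eq_range']
  apply List.map_congr_left
  intro r _
  by_cases hr : r = 0
  · subst hr; rfl
  · rw [if_neg hr, renderRow, List.map_singleton, if_neg (by omega)]
    rfl

-- ===== VERDICT (by name: the statement is the Claim_ definition above) =====
theorem get_w1_spec : Claim_equal_get_w1 := by
  intro height _
  unfold Spec_get_w1 get_w1 get_w1_alt
  by_cases hlt : height < 2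
  · simp [hlt]
  · simp only [if_neg hlt]
    have hh2 : 2 ≤ height.toNat := by omega
    have hm : (height - 1).toNat = height.toNat - 1 := by omega
    set h := height.toNat with hh
    set m := h - 1 with hmm
    have hrange2 : List.range 2 = [0, 1] := rfl
    rw [hrange2]
    simp only [List.foldl_cons, List.foldl_nil, hm]
    rw [init_render]
    have c0 : ((0 : Nat) : Int) = (0 : Int) := rfl
    rw [← c0]
    rw [downLoop_spec h m 0 [0] (by omega)]
    rw [upLoop_spec h m (0 + m) ([0] ++ List.range' (0 + 1) m) (by omega) (by omega)]
    have e1 : (0 + m) - m = 0 := by omega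
    rw [e1]
    rw [downLoop_spec h m 0 _ (by omega)]
    rw [upLoop_spec h m (0 + m) _ (by omega) (by omega)]
    rw [e1]
    simp only [render, List.range_eq_range', Nat.zero_add]
    apply List.map_congr_left
    intro r _
    simp [renderRow, List.append_assoc]
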